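-- pv_equiv track=rewrite | github.com/gkagm2/BigdataAndPythonStudy | training/exercise/q1.py | prog2com
-- ===== SOURCE A (Python) =====
-- def prog2com(inlist, coms):
--     outlist = [] # 바구니(컴퓨터)
--     sumout = [] # 바구니 한 개마다 담겨진 빵(수행할 프로그램)의 합계를 갖는 목록
--     for x in range(coms): # 초기화
--         outlist.append([])
--         sumout.append(0)
--     inlist.sort()
--     inlist.reverse()
--
--     for bread in inlist:
--         lowbasket = sumout.index(min(sumout))
--         outlist[lowbasket].append(bread)
--         sumout[lowbasket] += bread
--
--     return outlist
-- ===== SOURCE B (Python) =====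
-- def _insort(pq, item):
--     # insert item into ascending-sorted pq, keeping it sorted (ties impossible:
--     # second components are distinct basket indices)
--     k = 0
--     while k < len(pq) and pq[k] < item:
--         k += 1
--     pq.insert(k, item)
--
--
-- def prog2com(inlist, coms):
--     # priority queue of (load, basket index), kept sorted ascending, so the
--     # least-loaded basket (lowest index on ties) is always pq[0]
--     inlist.sort(reverse=True)
--     pq = [(0, i) for i in range(coms)]
--     buckets = [[] for _ in range(coms)]
--     for bread in inlist:
--         load, i = pq.pop(0)
--         buckets[i].append(bread)
--         _insort(pq, (load + bread, i))
--     return buckets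
-- ===== Notes on version B (the rewrite author's own statement) =====
-- stated objective: alternative
-- what changed: A rescans the whole load list twice per item (min() then .index()) over two parallel lists; B keeps a single priority queue of (load, basket-index) pairs sorted ascending, pops the least-loaded basket from the front and re-inserts it by ordered insertion.
import Mathlib
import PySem

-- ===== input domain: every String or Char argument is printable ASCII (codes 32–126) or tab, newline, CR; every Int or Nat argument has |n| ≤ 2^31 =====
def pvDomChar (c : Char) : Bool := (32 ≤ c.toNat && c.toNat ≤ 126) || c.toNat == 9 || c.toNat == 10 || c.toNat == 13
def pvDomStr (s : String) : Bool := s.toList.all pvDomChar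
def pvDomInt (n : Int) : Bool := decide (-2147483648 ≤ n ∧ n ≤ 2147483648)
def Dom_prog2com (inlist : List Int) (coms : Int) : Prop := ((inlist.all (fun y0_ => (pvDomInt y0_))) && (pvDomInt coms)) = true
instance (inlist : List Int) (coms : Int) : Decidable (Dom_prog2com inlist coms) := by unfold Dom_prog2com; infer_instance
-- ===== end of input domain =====

-- B replaces A's per-item 'min + index' double scan of the load list by a priority queue:
-- a list of (load, basket-index) pairs kept sorted ascending, popped at the front and
-- re-inserted by ordered insertion (objective: alternative selection structure).
-- Both Pythons sort the input list in place (observable mutation is identical);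
-- the equivalence proved here is about the RETURN value.

-- ===== PORT A =====
def prog2com (inlist : List Int) (coms : Int) : List (List Int) :=
  -- for x in range(coms): outlist.append([]); sumout.append(0)
  let init : List (List Int) × List Int :=
    (PySem.List.pyRange 0 coms 1).foldl
      (fun st _ => (st.1 ++ [([] : List Int)], st.2 ++ [(0 : Int)])) ([], [])
  -- inlist.sort(); inlist.reverse()
  let desc : List Int := (PySem.List.sorted inlist (fun x => x) false).reverse
  -- for bread in inlist: lowbasket = sumout.index(min(sumout)); …
  let fin : List (List Int) × List Int :=
    desc.foldl (fun st bread =>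
      match PySem.List.min? st.2 (fun x => x) with
      | none => st            -- min([]) raises ValueError: outside Pre_
      | some m =>
        match PySem.List.index? st.2 m with
        | none => st          -- unreachable (min is a member)
        | some j =>
          (st.1.set j ((st.1.getD j []) ++ [bread]),
           st.2.set j ((st.2.getD j 0) + bread))) init
  fin.1

-- ===== PORT B =====
-- Python tuple comparison (load, idx) < (load', idx') : lexicographic
def pvLexLt (a b : Int × Int) : Bool := a.1 < b.1 || (a.1 == b.1 && a.2 < b.2)

-- _insort: insert into an ascending-sorted list, keeping it sorted
def pvInsort (item : Int × Int) : List (Int × Int) → List (Int × Int)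
  | [] => [item]
  | h :: t => if pvLexLt h item then h :: pvInsort item t else item :: h :: t

def prog2com_alt (inlist : List Int) (coms : Int) : List (List Int) :=
  -- inlist.sort(reverse=True)
  let desc : List Int := PySem.List.sorted inlist (fun x => x) true
  -- pq = [(0, i) for i in range(coms)]
  let pq0 : List (Int × Int) := (PySem.List.pyRange 0 coms 1).map (fun i => ((0 : Int), i))
  -- buckets = [[] for _ in range(coms)]
  let b0 : List (List Int) := (PySem.List.pyRange 0 coms 1).map (fun _ => ([] : List Int))
  let fin : List (Int × Int) × List (List Int) :=
    desc.foldl (fun st bread =>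
      match st.1 with
      | [] => st              -- pq.pop(0) on empty raises IndexError: outside Pre_
      | (load, i) :: rest =>
        (pvInsort (load + bread, i) rest,
         st.2.set i.toNat ((st.2.getD i.toNat []) ++ [bread]))) (pq0, b0)
  fin.2

-- ===== PRECONDITION & SPEC =====
-- Pre_ excludes exactly the inputs where both Pythons raise (coms ≤ 0 with a nonempty
-- inlist: A's min([]) raises ValueError, B's pq.pop(0) raises IndexError).
def Pre_prog2com (inlist : List Int) (coms : Int) : Prop := 0 < coms ∨ inlist = []
instance (inlist : List Int) (coms : Int) : Decidable (Pre_prog2com inlist coms) := by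
  unfold Pre_prog2com; infer_instance

def pvWitness_prog2com : List Int × Int := ([5, 3, 8, 2], 2)

def Spec_prog2com (inlist : List Int) (coms : Int) (out : List (List Int)) : Prop := out = prog2com_alt inlist coms
instance (inlist : List Int) (coms : Int) (out : List (List Int)) : Decidable (Spec_prog2com inlist coms out) := by unfold Spec_prog2com; infer_instance

-- ===== CLAIM (what is proved, stated in full; the proofs are below) =====
def Claim_equal_prog2com : Prop := ∀ (inlist : List Int) (coms : Int), Dom_prog2com inlist coms → Pre_prog2com inlist coms → Spec_prog2com inlist coms (prog2com inlist coms)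

-- ===== LEMMAS AND PROOFS =====

-- the non-strict lexicographic order on (load, index) pairs
def pvLexLe (a b : Int × Int) : Prop := a.1 < b.1 ∨ (a.1 = b.1 ∧ a.2 ≤ b.2)

lemma pvLexLe_of_lt {a b : Int × Int} (h : pvLexLt a b = true) : pvLexLe a b := by
  simp [pvLexLt] at h; unfold pvLexLe; omega

lemma pvLexLe_of_not_lt {a b : Int × Int} (h : ¬ pvLexLt a b = true) : pvLexLe b a := by
  simp [pvLexLt] at h; unfold pvLexLe; omega

lemma pvLexLe_trans {a b c : Int × Int} (h1 : pvLexLe a b) (h2 : pvLexLe b c) : pvLexLe a c := by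
  unfold pvLexLe at *; omega

lemma pvLexLe_antisymm {a b : Int × Int} (h1 : pvLexLe a b) (h2 : pvLexLe b a) : a = b := by
  unfold pvLexLe at *
  have : a.1 = b.1 ∧ a.2 = b.2 := by omega
  exact Prod.ext this.1 this.2

lemma pvInsort_perm (item : Int × Int) (l : List (Int × Int)) :
    (pvInsort item l).Perm (item :: l) := by
  induction l with
  | nil => simp [pvInsort]
  | cons h t ih =>
    simp only [pvInsort]
    split
    · exact ((ih.cons h).trans (List.Perm.swap item h t)).symm.symm
    · exact List.Perm.refl _

lemma pvInsort_sorted (item : Int × Int) (l : List (Int × Int))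
    (hs : l.Pairwise pvLexLe) : (pvInsort item l).Pairwise pvLexLe := by
  induction l with
  | nil => simp [pvInsort]
  | cons h t ih =>
    rcases List.pairwise_cons.mp hs with ⟨hh, ht⟩
    simp only [pvInsort]
    split
    · rename_i hlt
      refine List.pairwise_cons.mpr ⟨?_, ih ht⟩
      intro y hy
      have : y ∈ item :: t := (pvInsort_perm item t).mem_iff.mp hy
      rcases List.mem_cons.mp this with rfl | hyt
      · exact pvLexLe_of_lt hlt
      · exact hh y hyt
    · rename_i hnlt
      refine List.pairwise_cons.mpr ⟨?_, hs⟩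
      intro y hy
      rcases List.mem_cons.mp hy with rfl | hyt
      · exact pvLexLe_of_not_lt hnlt
      · exact pvLexLe_trans (pvLexLe_of_not_lt hnlt) (hh y hyt)

-- the multiset of (load, basket-index) pairs carried by A's sumout list
def pvPairs (k : Int) : List Int → List (Int × Int)
  | [] => []
  | x :: t => (x, k) :: pvPairs (k + 1) t

lemma pvPairs_length (k : Int) (s : List Int) : (pvPairs k s).length = s.length := by
  induction s generalizing k with
  | nil => rfl
  | cons x t ih => simp [pvPairs, ih]

lemma pvPairs_getElem (k : Int) (s : List Int) (j : Nat) (hj : j < s.length) :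
    (pvPairs k s)[j]'(by rw [pvPairs_length]; exact hj) = (s[j], k + j) := by
  induction s generalizing k j with
  | nil => simp at hj
  | cons x t ih =>
    cases j with
    | zero => simp [pvPairs]
    | succ j' =>
      simp only [pvPairs, List.getElem_cons_succ]
      rw [ih (k + 1) j' (by simpa using hj)]
      congr 1
      push_cast; ring_nf

lemma pvPairs_mem (k : Int) (s : List Int) (p : Int × Int) (hp : p ∈ pvPairs k s) :
    ∃ j : Nat, ∃ _ : j < s.length, p = (s[j], k + j) := by
  induction s generalizing k with
  | nil => simp [pvPairs] at hp
  | cons x t ih =>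
    simp only [pvPairs, List.mem_cons] at hp
    rcases hp with rfl | hp
    · exact ⟨0, by simp, by simp⟩
    · rcases ih (k + 1) hp with ⟨j, hj, rfl⟩
      refine ⟨j + 1, by simpa using hj, ?_⟩
      simp only [List.getElem_cons_succ]
      congr 1
      push_cast; ring_nf

lemma pvPairs_set (k : Int) (s : List Int) (j : Nat) (v : Int) (hj : j < s.length) :
    pvPairs k (s.set j v) = (pvPairs k s).set j (v, k + j) := by
  induction s generalizing k j with
  | nil => simp at hj
  | cons x t ih =>
    cases j with
    | zero => simp [pvPairs]
    | succ j' =>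
      simp only [List.set_cons_succ, pvPairs, List.set]
      rw [ih (k + 1) j' (by simpa using hj)]
      congr 2
      push_cast; ring_nf

-- head of the sorted pq is exactly A's choice: (min sumout, first index of that min)
lemma pvHead_eq_argmin (s : List Int) (pq : List (Int × Int)) (m : Int) (j : Nat)
    (hsort : pq.Pairwise pvLexLe) (hperm : pq.Perm (pvPairs 0 s))
    (hmin : PySem.List.min? s (fun x => x) = some m)
    (hidx : PySem.List.index? s m = some j) :
    ∃ rest, pq = (m, (j : Int)) :: rest := by
  rcases PySem.List.getElem_of_index?_eq_some hidx with ⟨hjlen, hsj, hfirst⟩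
  have hmem : ((m, (j : Int)) : Int × Int) ∈ pq := by
    rw [hperm.mem_iff]
    have := pvPairs_getElem 0 s j hjlen
    rw [hsj] at this
    simp only [zero_add] at this
    rw [← this]
    exact List.getElem_mem _
  rcases pq with _ | ⟨h, rest⟩
  · simp at hmem
  refine ⟨rest, ?_⟩
  have hhle : pvLexLe h (m, (j : Int)) := by
    rcases List.mem_cons.mp hmem with heq | hmemr
    · rw [heq]; exact Or.inr ⟨rfl, le_refl _⟩
    · exact (List.pairwise_cons.mp hsort).1 _ hmemr
  have hhmem : h ∈ pvPairs 0 s := hperm.mem_iff.mp (List.mem_cons_self)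
  rcases pvPairs_mem 0 s h hhmem with ⟨j', hj', rfl⟩
  have hmle : m ≤ s[j'] := PySem.List.min?_isMin hmin _ (List.getElem_mem _)
  have hleh : pvLexLe (m, (j : Int)) (s[j'], (0 : Int) + j') := by
    rcases lt_or_eq_of_le hmle with hlt | heq
    · exact Or.inl hlt
    · refine Or.inr ⟨heq, ?_⟩
      have hnlt : ¬ j' < j := fun hc => hfirst j' hc heq.symm
      have hjj : j ≤ j' := Nat.le_of_not_lt hnlt
      simp only [zero_add]
      exact_mod_cast hjj
  have heq2 := pvLexLe_antisymm hhle hleh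
  rw [heq2]

-- the loop invariant, and its preservation by one step of each loop
def pvInv (st : List (List Int) × List Int) (st' : List (Int × Int) × List (List Int)) : Prop :=
  st'.2 = st.1 ∧ st'.1.Pairwise pvLexLe ∧ st'.1.Perm (pvPairs 0 st.2)

def pvStepA (st : List (List Int) × List Int) (bread : Int) : List (List Int) × List Int :=
  match PySem.List.min? st.2 (fun x => x) with
  | none => st
  | some m =>
    match PySem.List.index? st.2 m with
    | none => st
    | some j =>
      (st.1.set j ((st.1.getD j []) ++ [bread]),
       st.2.set j ((st.2.getD j 0) + bread))

def pvStepB (st : List (Int × Int) × List (List Int)) (bread : Int) :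
    List (Int × Int) × List (List Int) :=
  match st.1 with
  | [] => st
  | (load, i) :: rest =>
    (pvInsort (load + bread, i) rest,
     st.2.set i.toNat ((st.2.getD i.toNat []) ++ [bread]))

lemma pvInv_step (st : List (List Int) × List Int) (st' : List (Int × Int) × List (List Int))
    (bread : Int) (h : pvInv st st') : pvInv (pvStepA st bread) (pvStepB st' bread) := by
  obtain ⟨hb, hsort, hperm⟩ := h
  rcases hs : st.2 with _ | ⟨x, t⟩
  · -- sumout empty: both steps are the identity
    have hpairs : pvPairs 0 st.2 = [] := by rw [hs]; rfl
    have hpq : st'.1 = [] := by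
      have h' := hperm
      rw [hpairs] at h'
      exact h'.eq_nil
    have hmin : PySem.List.min? st.2 (fun x => x) = none := by
      rw [PySem.List.min?_eq_none_iff]; exact hs
    simp only [pvStepA, pvStepB, hmin, hpq]
    exact ⟨hb, hsort, hperm⟩
  · -- sumout nonempty: A picks (m, j); B pops the head, which equals (m, j)
    have hne : st.2 ≠ [] := by rw [hs]; simp
    obtain ⟨m, hmin⟩ : ∃ m, PySem.List.min? st.2 (fun x => x) = some m := by
      rcases hm : PySem.List.min? st.2 (fun x => x) with _ | m
      · exact absurd ((PySem.List.min?_eq_none_iff _ _).mp hm) hne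
      · exact ⟨m, rfl⟩
    obtain ⟨j, hidx⟩ : ∃ j, PySem.List.index? st.2 m = some j := by
      have hmem : m ∈ st.2 := PySem.List.min?_mem hmin
      rcases hi : PySem.List.index? st.2 m with _ | j
      · rw [PySem.List.index?_eq_none_iff] at hi
        exact absurd hmem hi
      · exact ⟨j, rfl⟩
    rcases pvHead_eq_argmin st.2 st'.1 m j hsort hperm hmin hidx with ⟨rest, hpq⟩
    rcases PySem.List.getElem_of_index?_eq_some hidx with ⟨hjlen, hsj, _⟩
    simp only [pvStepA, pvStepB, hmin, hidx, hpq]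
    have htn : ((j : Int)).toNat = j := Int.toNat_natCast j
    refine ⟨by rw [htn, hb], ?_, ?_⟩
    · exact pvInsort_sorted _ rest (List.pairwise_cons.mp (hpq ▸ hsort)).2
    · -- pq after re-insertion is a permutation of the pairs of the updated sumout
      have hgd : st.2.getD j 0 = m := by
        rw [List.getD_eq_getElem?_getD, List.getElem?_eq_getElem hjlen, hsj]; rfl
      rw [hgd]
      have hset : pvPairs 0 (st.2.set j (m + bread)) =
          (pvPairs 0 st.2).set j (m + bread, (j : Int)) := by
        rw [pvPairs_set 0 st.2 j (m + bread) hjlen]; simp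
      rw [hset]
      have hjlen' : j < (pvPairs 0 st.2).length := by rw [pvPairs_length]; exact hjlen
      have hat : (pvPairs 0 st.2)[j]'hjlen' = (m, (j : Int)) := by
        rw [pvPairs_getElem 0 st.2 j hjlen, hsj]; simp
      -- (pairs).set j v ~ v :: (pairs).eraseIdx j ; rest ~ (pairs).eraseIdx j
      have h1 : ((pvPairs 0 st.2).set j (m + bread, (j : Int))).Perm
          ((m + bread, (j : Int)) :: (pvPairs 0 st.2).eraseIdx j) :=
        List.set_perm_cons_eraseIdx hjlen' _
      have h2 : (pvPairs 0 st.2).Perm ((m, (j : Int)) :: (pvPairs 0 st.2).eraseIdx j) := by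
        have := (List.getElem_cons_eraseIdx_perm hjlen').symm
        rwa [hat] at this
      have hrest : rest.Perm ((pvPairs 0 st.2).eraseIdx j) := by
        have : ((m, (j : Int)) :: rest).Perm ((m, (j : Int)) :: (pvPairs 0 st.2).eraseIdx j) :=
          (hpq ▸ hperm).trans h2
        exact this.cons_inv
      exact ((pvInsort_perm _ _).trans (hrest.cons _)).trans h1.symm

lemma pvInv_foldl (d : List Int) (st : List (List Int) × List Int)
    (st' : List (Int × Int) × List (List Int)) (h : pvInv st st') :
    pvInv (d.foldl pvStepA st) (d.foldl pvStepB st') := by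
  induction d generalizing st st' with
  | nil => exact h
  | cons x t ih => exact ih _ _ (pvInv_step st st' x h)

-- A's ascending-sort-then-reverse equals B's sorted(reverse=True)
lemma pvDesc_eq (inlist : List Int) :
    (PySem.List.sorted inlist (fun x => x) false).reverse =
    PySem.List.sorted inlist (fun x => x) true := by
  have h1 : ((PySem.List.sorted inlist (fun x => x) false).reverse).Pairwise
      (fun a b : Int => b ≤ a) := by
    rw [List.pairwise_reverse]
    exact PySem.List.sorted_pairwise inlist (fun x => x)
  have h2 : (PySem.List.sorted inlist (fun x => x) true).Pairwise
      (fun a b : Int => b ≤ a) := PySem.List.sorted_pairwise_rev inlist (fun x => x)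
  have hp : ((PySem.List.sorted inlist (fun x => x) false).reverse).Perm
      (PySem.List.sorted inlist (fun x => x) true) :=
    ((List.reverse_perm _).trans (PySem.List.sorted_perm inlist _ false)).trans
      (PySem.List.sorted_perm inlist _ true).symm
  exact hp.eq_of_pairwise (fun a b _ _ x y => le_antisymm y x) h1 h2

-- the fresh pq is exactly the pairs of the all-zero sumout
lemma pvPairs_replicate (n : Nat) (k : Int) :
    pvPairs k (List.replicate n (0 : Int)) = (List.range n).map (fun t : Nat => ((0 : Int), k + (t : Int))) := by
  induction n generalizing k with
  | zero => simp [pvPairs]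
  | succ n ih =>
    rw [List.replicate_succ, List.range_succ_eq_map, List.map_cons, List.map_map]
    simp only [pvPairs, ih (k + 1)]
    refine congrArg₂ _ (by simp) ?_
    apply List.map_congr_left
    intro a _
    simp only [Function.comp_apply]
    congr 1
    push_cast; ring_nf

-- the initial states satisfy the invariant
lemma pvInv_init (coms : Int) :
    pvInv ((PySem.List.pyRange 0 coms 1).foldl
            (fun st _ => (st.1 ++ [([] : List Int)], st.2 ++ [(0 : Int)])) ([], []))
          ((PySem.List.pyRange 0 coms 1).map (fun i => ((0 : Int), i)),
           (PySem.List.pyRange 0 coms 1).map (fun _ => ([] : List Int))) := by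
  rw [PySem.List.foldl_prod_mk (f := fun acc (_ : Int) => acc ++ [([] : List Int)])
        (g := fun acc (_ : Int) => acc ++ [(0 : Int)])]
  rw [PySem.List.foldl_append_singleton_eq_map, PySem.List.foldl_append_singleton_eq_map]
  refine ⟨by simp, ?_, ?_⟩
  · exact (PySem.List.pairwise_lt_pyRange_one 0 coms).map _
      (fun a b h => Or.inr ⟨rfl, le_of_lt h⟩)
  · have hrep : List.map (fun (_ : Int) => (0 : Int)) (PySem.List.pyRange 0 coms 1) =
        List.replicate (coms - 0).toNat (0 : Int) := by
      rw [List.map_const', PySem.List.length_pyRange_one]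
    simp only [List.nil_append, hrep, pvPairs_replicate]
    rw [PySem.List.pyRange_one 0 coms, List.map_map]
    apply List.Perm.of_eq
    apply List.map_congr_left
    intro a _
    simp

-- ===== VERDICT (by name: the statement is the Claim_ definition above) =====
theorem prog2com_spec : Claim_equal_prog2com := by
  intro inlist coms _ _
  unfold Spec_prog2com prog2com prog2com_alt
  rw [pvDesc_eq]
  have h := pvInv_foldl (PySem.List.sorted inlist (fun x => x) true) _ _ (pvInv_init coms)
  exact h.1.symm
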